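-- pv_equiv track=rewrite | github.com/abrarhassan7809/dine_flow_restaurant | utils/helpers.py | calculate_prep_time
-- ===== SOURCE A (Python) =====
-- from typing import Any, Dict, List, Optional
--
-- def calculate_prep_time(items: List[Dict]) -> int:
--     """Calculate total preparation time for items"""
--     if not items:
--         return 0
--
--     # Group by prep time and calculate parallel preparation
--     prep_times = {}
--     for item in items:
--         time = item.get('prep_time', 10)
--         prep_times[time] = prep_times.get(time, 0) + item.get('quantity', 1)
--
--     # Maximum time is the longest prep time
--     # But if multiple items with same time, they're prepared in parallel
--     return max(prep_times.keys()) if prep_times else 0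
-- ===== SOURCE B (Python) =====
-- def calculate_prep_time(items):
--     """Calculate total preparation time for items"""
--     if not items:
--         return 0
--     return max(item.get('prep_time', 10) for item in items)
-- ===== Notes on version B (the rewrite author's own statement) =====
-- stated objective: simpler
-- what changed: B drops A's quantity-keyed dict entirely and returns the max of item.get('prep_time', 10) over a single generator pass.
import Mathlib
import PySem

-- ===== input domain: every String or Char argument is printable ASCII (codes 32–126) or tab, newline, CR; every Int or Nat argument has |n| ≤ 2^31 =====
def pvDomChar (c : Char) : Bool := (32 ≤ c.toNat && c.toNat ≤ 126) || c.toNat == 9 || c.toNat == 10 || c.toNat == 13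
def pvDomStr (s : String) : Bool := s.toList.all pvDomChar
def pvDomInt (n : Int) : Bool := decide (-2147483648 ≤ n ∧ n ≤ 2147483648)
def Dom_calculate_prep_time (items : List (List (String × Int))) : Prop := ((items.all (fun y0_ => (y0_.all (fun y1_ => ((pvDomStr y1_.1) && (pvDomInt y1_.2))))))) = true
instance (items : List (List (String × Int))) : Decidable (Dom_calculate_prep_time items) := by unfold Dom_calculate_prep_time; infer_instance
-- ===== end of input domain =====

-- B drops A's quantity-keyed dict and returns the max of item.get('prep_time', 10) in one pass (simpler).
-- ===== PORT A =====
-- item.get(key, default) on an association-list dict: first match, else default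
def pvItemGetD (item : List (String × Int)) (k : String) (d : Int) : Int :=
  ((item.find? (fun p => p.1 == k)).map (·.2)).getD d

def calculate_prep_time (items : List (List (String × Int))) : Int :=
  if items = [] then 0
  else
    let prep_times : PySem.Dict Int Int :=
      items.foldl
        (fun d item =>
          let time := pvItemGetD item "prep_time" 10
          d.insert time (d.getD time 0 + pvItemGetD item "quantity" 1))
        PySem.Dict.empty
    if prep_times.items = [] then 0
    else (PySem.List.max? prep_times.keys (fun x => x)).getD 0

-- ===== PORT B =====
def calculate_prep_time_alt (items : List (List (String × Int))) : Int :=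
  if items = [] then 0
  else (PySem.List.max? (items.map (fun item => pvItemGetD item "prep_time" 10)) (fun x => x)).getD 0

-- ===== PRECONDITION & SPEC =====
def Spec_calculate_prep_time (items : List (List (String × Int))) (out : Int) : Prop := out = calculate_prep_time_alt items
instance (items : List (List (String × Int))) (out : Int) : Decidable (Spec_calculate_prep_time items out) := by unfold Spec_calculate_prep_time; infer_instance

-- ===== CLAIM (what is proved, stated in full; the proofs are below) =====
def Claim_equal_calculate_prep_time : Prop := ∀ (items : List (List (String × Int))), Dom_calculate_prep_time items → Spec_calculate_prep_time items (calculate_prep_time items)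

-- ===== LEMMAS AND PROOFS =====

-- ===== VERDICT (by name: the statement is the Claim_ definition above) =====
-- The dict's key list is exactly the deduped list of prep times, so both maxima agree.
theorem calculate_prep_time_spec : Claim_equal_calculate_prep_time := by
  intro items _
  unfold Spec_calculate_prep_time calculate_prep_time calculate_prep_time_alt
  by_cases h : items = []
  · simp [h]
  · simp only [if_neg h]
    set times := items.map (fun item => pvItemGetD item "prep_time" 10) with htimes
    have hkeys : (items.foldl
        (fun d item =>
          let time := pvItemGetD item "prep_time" 10
          d.insert time (d.getD time 0 + pvItemGetD item "quantity" 1))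
        (PySem.Dict.empty : PySem.Dict Int Int)).keys = PySem.Set.ofList times := by
      rw [PySem.Dict.keys_foldl_insert_key]
      simp only [PySem.Set.update, PySem.Set.ofList_eq_foldl, PySem.Dict.keys,
        PySem.Dict.empty, List.map_nil, htimes]
    have htne : times ≠ [] := by
      simp [htimes, h]
    have hkne : PySem.Set.ofList times ≠ [] := by
      obtain ⟨t, ts, he⟩ := List.exists_cons_of_ne_nil htne
      intro hc
      have : t ∈ PySem.Set.ofList times := by
        rw [PySem.Set.mem_ofList, he]; exact List.mem_cons_self
      simp [hc] at this
    have hitems_ne : (items.foldl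
        (fun d item =>
          let time := pvItemGetD item "prep_time" 10
          d.insert time (d.getD time 0 + pvItemGetD item "quantity" 1))
        (PySem.Dict.empty : PySem.Dict Int Int)).items ≠ [] := by
      intro hc
      apply hkne
      rw [← hkeys]
      simp [PySem.Dict.keys, hc]
    simp only [if_neg hitems_ne, hkeys]
    obtain ⟨m1, hm1⟩ := Option.ne_none_iff_exists'.mp
      (by rw [Ne, PySem.List.max?_eq_none_iff]; exact hkne :
        PySem.List.max? (PySem.Set.ofList times) (fun x => x) ≠ none)
    obtain ⟨m2, hm2⟩ := Option.ne_none_iff_exists'.mp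
      (by rw [Ne, PySem.List.max?_eq_none_iff]; exact htne :
        PySem.List.max? times (fun x => x) ≠ none)
    rw [hm1, hm2]
    have h12 : m1 ≤ m2 := PySem.List.max?_isMax hm2 m1
      (by rw [← PySem.Set.mem_ofList]; exact PySem.List.max?_mem hm1)
    have h21 : m2 ≤ m1 := PySem.List.max?_isMax hm1 m2
      (by rw [PySem.Set.mem_ofList]; exact PySem.List.max?_mem hm2)
    simp [le_antisymm h12 h21]
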